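-- pv_equiv track=rewrite | github.com/pypi-data/pypi-mirror-368 | packages/epson-escp2/epson_escp2-1.0.2.tar.gz/epson_escp2-1.0.2/epson_escp2/epson_encode.py | _parse_text_blocks
-- ===== SOURCE A (Python) =====
-- from typing import List, Tuple, Union, Optional
--
-- def _parse_text_blocks(text: str) -> List[Tuple[str, List[str]]]:
--     """Parse text into blocks: normal text vs. tables."""
--     lines = text.splitlines()
--     blocks = []
--     current_block = []
--     in_table = False
--
--     for line in lines + [""]:  # Add empty line to flush last block
--         is_table_line = "|" in line and line.strip()
--
--         if is_table_line and not in_table: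
--             # Start of table - save current text block
--             if current_block:
--                 blocks.append(("text", current_block))
--                 current_block = []
--             in_table = True
--             current_block.append(line)
--         elif not is_table_line and in_table:
--             # End of table - save table block
--             blocks.append(("table", current_block))
--             current_block = []
--             in_table = False
--             current_block.append(line)
--         else:
--             current_block.append(line)
--
--     # Add final block if not empty
--     if current_block:
--         block_type = "table" if in_table else "text"
--         blocks.append((block_type, current_block))
--
--     return blocks
-- ===== SOURCE B (Python) =====
-- def _parse_text_blocks(text):
--     """Parse text into blocks: normal text vs. tables (run-grouping formulation)."""
--     lines = text.splitlines() + [""]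
--     def is_table(line):
--         return bool("|" in line and line.strip())
--     blocks = []
--     i, n = 0, len(lines)
--     while i < n:
--         k = is_table(lines[i])
--         j = i + 1
--         while j < n and is_table(lines[j]) == k:
--             j += 1
--         blocks.append(("table" if k else "text", lines[i:j]))
--         i = j
--     return blocks
-- ===== Notes on version B (the rewrite author's own statement) =====
-- stated objective: alternative
-- what changed: Replaces A's in_table flag state machine with manual flushes by a classify-then-group-runs scan: each maximal run of equally-classified lines of splitlines()+[''] becomes one block directly.
import Mathlib
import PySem

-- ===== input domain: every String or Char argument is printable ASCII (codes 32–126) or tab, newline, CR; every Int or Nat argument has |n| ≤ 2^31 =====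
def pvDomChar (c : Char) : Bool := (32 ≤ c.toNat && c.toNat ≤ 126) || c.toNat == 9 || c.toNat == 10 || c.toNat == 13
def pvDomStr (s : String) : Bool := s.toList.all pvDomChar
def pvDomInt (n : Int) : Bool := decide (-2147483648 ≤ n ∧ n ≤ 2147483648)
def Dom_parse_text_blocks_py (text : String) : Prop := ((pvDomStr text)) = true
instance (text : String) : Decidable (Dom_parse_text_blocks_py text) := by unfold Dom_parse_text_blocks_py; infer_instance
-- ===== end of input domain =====

-- B replaces A's in_table state machine (with manual block flushes) by a classify-then-group-runs scan; same O(n) cost, return values identical.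

-- ===== PORT A =====
-- '"|" in line and line.strip()' used as a boolean (truthy iff '|' present and strip nonempty)
def pvIsTableLine (line : String) : Bool :=
  PySem.Str.isIn "|" line && !(PySem.Str.strip line == "")

def pvAStep (st : List (String × List String) × List String × Bool) (line : String) :
    List (String × List String) × List String × Bool :=
  match st with
  | (blocks, cur, inTable) =>
    let t := pvIsTableLine line
    if t && !inTable then
      ((if cur ≠ [] then blocks ++ [("text", cur)] else blocks), [line], true)
    else if !t && inTable then
      (blocks ++ [("table", cur)], [line], false)
    else
      (blocks, cur ++ [line], inTable)

def parse_text_blocks_py (text : String) : List (String × List String) :=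
  let lines := PySem.Str.splitlines text
  match (lines ++ [""]).foldl pvAStep ([], [], false) with
  | (blocks, cur, inTable) =>
    if cur ≠ [] then blocks ++ [((if inTable then "table" else "text"), cur)] else blocks

-- ===== PORT B =====
def pvRuns (ls : List String) : List (String × List String) :=
  match ls with
  | [] => []
  | l :: rest =>
    let k := pvIsTableLine l
    ((if k then "table" else "text"), l :: rest.takeWhile (fun x => pvIsTableLine x == k))
      :: pvRuns (rest.dropWhile (fun x => pvIsTableLine x == k))
termination_by ls.length
decreasing_by
  simp only [List.length_cons]
  exact Nat.lt_succ_of_le (List.length_dropWhile_le _ _)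

def parse_text_blocks_py_alt (text : String) : List (String × List String) :=
  pvRuns (PySem.Str.splitlines text ++ [""])

-- ===== PRECONDITION & SPEC =====
def Spec_parse_text_blocks_py (text : String) (out : List (String × List String)) : Prop := out = parse_text_blocks_py_alt text
instance (text : String) (out : List (String × List String)) : Decidable (Spec_parse_text_blocks_py text out) := by unfold Spec_parse_text_blocks_py; infer_instance

-- ===== CLAIM (what is proved, stated in full; the proofs are below) =====
def Claim_equal_parse_text_blocks_py : Prop := ∀ (text : String), Dom_parse_text_blocks_py text → Spec_parse_text_blocks_py text (parse_text_blocks_py text)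

-- ===== LEMMAS AND PROOFS =====

-- The final flush A performs after its loop (proof-side name for A's trailing 'if')
def pvFlush (st : List (String × List String) × List String × Bool) : List (String × List String) :=
  match st with
  | (blocks, cur, inTable) =>
    if cur ≠ [] then blocks ++ [((if inTable then "table" else "text"), cur)] else blocks

-- Core invariant: with a nonempty current block, running A's loop and flushing emits the
-- current run (extended by the matching prefix of ls) and then the runs of the remainder.
theorem pv_loop_eq (ls : List String) : ∀ (blocks : List (String × List String))
    (cur : List String) (flag : Bool), cur ≠ [] →
    pvFlush (ls.foldl pvAStep (blocks, cur, flag)) =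
      blocks ++ ((if flag then "table" else "text"),
            cur ++ ls.takeWhile (fun x => pvIsTableLine x == flag))
        :: pvRuns (ls.dropWhile (fun x => pvIsTableLine x == flag)) := by
  induction ls with
  | nil =>
    intro blocks cur flag hcur
    simp [pvFlush, pvRuns, hcur]
  | cons l ls ih =>
    intro blocks cur flag hcur
    by_cases h : pvIsTableLine l = flag
    · have hstep : pvAStep (blocks, cur, flag) l = (blocks, cur ++ [l], flag) := by
        cases flag <;> simp [pvAStep, h]
      simp only [List.foldl_cons, hstep, List.takeWhile_cons, List.dropWhile_cons, h,
        beq_self_eq_true, if_pos]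
      rw [ih blocks (cur ++ [l]) flag (by simp)]
      simp
    · have hstep : pvAStep (blocks, cur, flag) l =
          (blocks ++ [((if flag then "table" else "text"), cur)], [l], pvIsTableLine l) := by
        cases flag <;> cases ht : pvIsTableLine l <;>
          simp [pvAStep, ht, hcur] <;> simp [ht] at h
      have hne : (pvIsTableLine l == flag) = false := by simp [h]
      simp only [List.foldl_cons, hstep, List.takeWhile_cons, List.dropWhile_cons, hne,
        if_neg Bool.false_ne_true]
      rw [ih _ [l] (pvIsTableLine l) (by simp)]
      rw [pvRuns]
      simp
  -- (induction tactic handles the generalization)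

theorem pv_runs_eq (l : String) (ls : List String) :
    pvFlush ((l :: ls).foldl pvAStep ([], [], false)) = pvRuns (l :: ls) := by
  have hstep : pvAStep ([], [], false) l = ([], [l], pvIsTableLine l) := by
    cases ht : pvIsTableLine l <;> simp [pvAStep, ht]
  simp only [List.foldl_cons, hstep]
  rw [pv_loop_eq ls [] [l] (pvIsTableLine l) (by simp)]
  rw [pvRuns]
  simp

-- ===== VERDICT (by name: the statement is the Claim_ definition above) =====
theorem parse_text_blocks_py_spec : Claim_equal_parse_text_blocks_py := by
  intro text _
  show parse_text_blocks_py text = parse_text_blocks_py_alt text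
  unfold parse_text_blocks_py parse_text_blocks_py_alt
  cases h : PySem.Str.splitlines text with
  | nil => exact pv_runs_eq "" []
  | cons a as =>
    show pvFlush (((a :: as) ++ [""]).foldl pvAStep ([], [], false)) = _
    rw [List.cons_append]
    exact pv_runs_eq a (as ++ [""])
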